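-- pv_equiv track=rewrite | github.com/dbstj1231/drone_asr | drone_asr.py | digit2str
-- ===== SOURCE A (Python) =====
-- def digit2str(str):
--     digit_flag = 0
--     new_str = ''
--     words = {
--         "0" : "zero",
--         "1" : "one",
--         "2" : "two",
--         "3" : "three",
--         "4" : "four",
--         "5" : "five",
--         "6" : "six",
--         "7" : "seven",
--         "8" : "eight",
--         "9" : "nine"
--     }
--
--     for i in str:
--         if i.isdigit():
--             if digit_flag == 1:
--                 new_str += ' '
--             new_str += words[i]
--             digit_flag = 1
--         else:
--             digit_flag = 0
--             new_str += i
--     return new_str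
-- ===== SOURCE B (Python) =====
-- def digit2str(str):
--     words = {
--         "0" : "zero",
--         "1" : "one",
--         "2" : "two",
--         "3" : "three",
--         "4" : "four",
--         "5" : "five",
--         "6" : "six",
--         "7" : "seven",
--         "8" : "eight",
--         "9" : "nine"
--     }
--     chars = list(str)
--     n = len(chars)
--     parts = []
--     i = 0
--     while i < n:
--         if chars[i].isdigit():
--             j = i
--             while j < n and chars[j].isdigit():
--                 j += 1
--             parts.append(' '.join(words[c] for c in chars[i:j]))
--             i = j
--         else:
--             parts.append(chars[i])
--             i += 1
--     return ''.join(parts)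
-- ===== Notes on version B (the rewrite author's own statement) =====
-- stated objective: alternative
-- what changed: B splits the input into maximal runs of consecutive digits with a two-pointer scan and space-joins each run's spelled-out words at once, instead of A's per-character loop carrying a digit_flag state and growing the string one piece at a time.
import Mathlib
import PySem

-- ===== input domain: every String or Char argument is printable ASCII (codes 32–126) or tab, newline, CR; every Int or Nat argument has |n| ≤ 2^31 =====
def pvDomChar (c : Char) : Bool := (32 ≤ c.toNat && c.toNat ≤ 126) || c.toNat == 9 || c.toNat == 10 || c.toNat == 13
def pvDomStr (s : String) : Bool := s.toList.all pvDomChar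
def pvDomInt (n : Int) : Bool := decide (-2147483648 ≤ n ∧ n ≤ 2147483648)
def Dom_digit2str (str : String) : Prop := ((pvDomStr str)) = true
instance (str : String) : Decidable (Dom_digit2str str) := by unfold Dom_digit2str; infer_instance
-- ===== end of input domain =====

-- B replaces A's per-character digit_flag loop by a two-pointer scan over maximal digit runs,
-- joining each run's spelled-out words with ' '.join (objective: alternative decomposition).


-- ===== PORT A =====
-- the words dict of A (B's python carries an identical literal dict)
def pvWords : PySem.Dict String String :=
  PySem.Dict.ofList [("0", "zero"), ("1", "one"), ("2", "two"), ("3", "three"), ("4", "four"),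
   ("5", "five"), ("6", "six"), ("7", "seven"), ("8", "eight"), ("9", "nine")]

-- one iteration of A's for-loop; state = (digit_flag, new_str.toList)
def digit2strStep (p : Int × List Char) (i : Char) : Int × List Char :=
  if PySem.Chars.isdigit i then
    (1, (if p.1 == 1 then p.2 ++ [' '] else p.2)
          ++ (PySem.Dict.getD pvWords (String.mk [i]) "").toList)
  else
    (0, p.2 ++ [i])

def digit2str (str : String) : String :=
  String.mk (str.toList.foldl digit2strStep (0, [])).2

-- ===== PORT B =====
-- ' '.join of the word lists of a run (port of ' '.join(words[c] for c in chars[i:j]))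
def pvJoinSp : List (List Char) → List Char
  | [] => []
  | [x] => x
  | x :: y :: xs => x ++ ' ' :: pvJoinSp (y :: xs)

def pvWordB (c : Char) : List Char :=
  (PySem.Dict.getD pvWords (String.mk [c]) "").toList

-- the while-loop over chars: a digit starts a run consumed with an inner scan (takeWhile/dropWhile)
def digit2strAltGo : List Char → List Char
  | [] => []
  | c :: rest =>
    if h : PySem.Chars.isdigit c then
      pvJoinSp (((c :: rest).takeWhile PySem.Chars.isdigit).map pvWordB)
        ++ digit2strAltGo ((c :: rest).dropWhile PySem.Chars.isdigit)
    else
      c :: digit2strAltGo rest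
  termination_by l => l.length
  decreasing_by
    · simp [List.dropWhile, h]
      exact List.length_dropWhile_le _ _
    · simp

def digit2str_alt (str : String) : String :=
  String.mk (digit2strAltGo str.toList)

-- ===== PRECONDITION & SPEC =====
def Spec_digit2str (str : String) (out : String) : Prop := out = digit2str_alt str
instance (str : String) (out : String) : Decidable (Spec_digit2str str out) := by unfold Spec_digit2str; infer_instance

-- ===== CLAIM (what is proved, stated in full; the proofs are below) =====
def Claim_equal_digit2str : Prop := ∀ (str : String), Dom_digit2str str → Spec_digit2str str (digit2str str)

-- ===== LEMMAS AND PROOFS =====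
-- direct recursive description of A's loop (flag is the digit_flag)
def specA : Int → List Char → List Char
  | _, [] => []
  | f, c :: rest =>
    if PySem.Chars.isdigit c then
      (if f == 1 then [' '] else []) ++ pvWordB c ++ specA 1 rest
    else
      c :: specA 0 rest

theorem foldA_eq_specA (l : List Char) : ∀ (f : Int) (acc : List Char),
    (l.foldl digit2strStep (f, acc)).2 = acc ++ specA f l := by
  induction l with
  | nil => intro f acc; simp [specA]
  | cons c rest ih =>
    intro f acc
    by_cases h : PySem.Chars.isdigit c
    · by_cases hf : f == 1 <;>
        simp [digit2strStep, specA, h, hf, ih, pvWordB]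
    · simp [digit2strStep, specA, h, ih]

theorem joinSp_cons (x : List Char) (xs : List (List Char)) :
    pvJoinSp (x :: xs) = x ++ xs.flatMap (fun y => ' ' :: y) := by
  induction xs generalizing x with
  | nil => simp [pvJoinSp]
  | cons y ys ih => simp [pvJoinSp, ih]

theorem specA_one (l : List Char) :
    specA 1 l = (l.takeWhile PySem.Chars.isdigit).flatMap (fun d => ' ' :: pvWordB d)
        ++ specA 0 (l.dropWhile PySem.Chars.isdigit) := by
  induction l with
  | nil => simp [specA]
  | cons c rest ih =>
    by_cases h : PySem.Chars.isdigit c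
    · simp [specA, h, ih]
    · simp [specA, h]

theorem specA_zero_eq_altGo (l : List Char) : specA 0 l = digit2strAltGo l := by
  induction l using digit2strAltGo.induct with
  | case1 => simp [specA, digit2strAltGo]
  | case2 c rest h ih =>
    rw [List.dropWhile_cons_of_pos h] at ih
    rw [digit2strAltGo, dif_pos h, List.takeWhile_cons_of_pos h,
        List.dropWhile_cons_of_pos h, specA, if_pos h, specA_one,
        List.map_cons, joinSp_cons, List.flatMap_map, ih]
    simp
  | case3 c rest h ih =>
    rw [digit2strAltGo, dif_neg h, specA, if_neg h, ih]

-- ===== VERDICT (by name: the statement is the Claim_ definition above) =====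
theorem digit2str_spec : Claim_equal_digit2str := by
  intro s _
  show _ = _
  rw [digit2str, digit2str_alt, foldA_eq_specA, specA_zero_eq_altGo]
  simp
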